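-- pv_equiv track=rewrite | github.com/Vpolgolosa/Python_Console_Chess | Chess/movement.py | checklad
-- ===== SOURCE A (Python) =====
-- def checklad(deck, pi, pj, fi, fj):
--     check = None
--     log = ""
--     if pi != fi and pj == fj:
--         if pi > fi:
--             i = fi + 1
--             while i < pi:
--                 if deck[i][pj] != "0":
--                     check = 0
--                     log = "\n Нельзя перепрыгивать другие фигуры!"
--                 i += 1
--             if check != 0:
--                 check = 1
--         if pi < fi:
--             i = fi - 1
--             while i > pi:
--                 if deck[i][pj] != "0":
--                     check = 0
--                     log = "\n Нельзя перепрыгивать другие фигуры!"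
--                 i -= 1
--             if check != 0:
--                 check = 1
--     elif pi == fi and pj != fj:
--         if pj > fj:
--             j = fj + 1
--             while j < pj:
--                 if deck[pi][j] != "0":
--                     check = 0
--                     log = "\n Нельзя перепрыгивать другие фигуры!"
--                 j += 1
--             if check != 0:
--                 check = 1
--         if pj < fj:
--             j = fj - 1
--             while j > pj:
--                 if deck[pi][j] != "0":
--                     check = 0
--                     log = "\n Нельзя перепрыгивать другие фигуры!"
--                 j -= 1
--             if check != 0:
--                 check = 1
--     else:
--         check = 0
--         log = "\n Нельзя так ходить!"
--     return check, log
-- ===== SOURCE B (Python) =====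
-- def checklad(deck, pi, pj, fi, fj):
--     # Whole-board scan: instead of walking along the move, enumerate every
--     # square of the deck once and flag any piece whose coordinates satisfy the
--     # geometric "strictly between the endpoints on the shared file/rank"
--     # predicate; the board is never indexed, so no IndexError is possible.
--     if (pi == fi) == (pj == fj):
--         return 0, "\n Нельзя так ходить!"
--     blocked = False
--     for i, row in enumerate(deck):
--         for j, sq in enumerate(row):
--             if pj == fj:
--                 on_path = j == pj and min(pi, fi) < i < max(pi, fi)
--             else:
--                 on_path = i == pi and min(pj, fj) < j < max(pj, fj)
--             if on_path and sq != "0":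
--                 blocked = True
--     if blocked:
--         return 0, "\n Нельзя перепрыгивать другие фигуры!"
--     return 1, ""
-- ===== Notes on version B (the rewrite author's own statement) =====
-- stated objective: alternative
-- what changed: Replaces A's four directional index-walks along the move by a single enumerate pass over the whole board that tests every square against a geometric 'strictly between the endpoints on the shared file/rank' predicate, never indexing the deck.
import Mathlib
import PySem

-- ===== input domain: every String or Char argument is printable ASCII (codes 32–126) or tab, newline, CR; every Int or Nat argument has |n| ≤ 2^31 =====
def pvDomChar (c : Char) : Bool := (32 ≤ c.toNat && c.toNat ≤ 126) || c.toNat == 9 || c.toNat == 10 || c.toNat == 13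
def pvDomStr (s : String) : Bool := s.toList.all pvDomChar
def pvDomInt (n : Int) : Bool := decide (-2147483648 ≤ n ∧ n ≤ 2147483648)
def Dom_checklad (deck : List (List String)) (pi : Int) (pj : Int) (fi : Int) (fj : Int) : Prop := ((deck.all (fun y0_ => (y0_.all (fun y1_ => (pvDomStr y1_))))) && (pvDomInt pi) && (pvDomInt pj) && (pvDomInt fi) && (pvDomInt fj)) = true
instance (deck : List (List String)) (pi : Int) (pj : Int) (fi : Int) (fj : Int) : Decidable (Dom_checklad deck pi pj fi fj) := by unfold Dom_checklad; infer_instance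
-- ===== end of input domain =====

-- B replaces A's directional index-walks along the move by one whole-board enumerate pass
-- testing every square against a geometric "strictly between the endpoints" predicate (alternative decomposition, no speed claim).

-- deck[i][j] with Python index semantics (none = IndexError; excluded by Pre_)
def pvSq (deck : List (List String)) (i j : Int) : Option String :=
  (PySem.List.pyGet? deck i).bind (fun r => PySem.List.pyGet? r j)

def pvMsgBlock : String := "\n Нельзя перепрыгивать другие фигуры!"
def pvMsgBad : String := "\n Нельзя так ходить!"

-- ===== PORT A =====
def checklad (deck : List (List String)) (pi : Int) (pj : Int) (fi : Int) (fj : Int) : Option Int × String :=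
  if pi ≠ fi ∧ pj = fj then
    let s0 : Option Int × String := (none, "")
    let s1 :=
      if pi > fi then
        let s := (PySem.List.pyRange (fi + 1) pi 1).foldl
          (fun s i => if pvSq deck i pj ≠ some "0" then ((some 0 : Option Int), pvMsgBlock) else s) s0
        if s.1 ≠ some 0 then ((some 1 : Option Int), s.2) else s
      else s0
    let s2 :=
      if pi < fi then
        let s := (PySem.List.pyRange (fi - 1) pi (-1)).foldl
          (fun s i => if pvSq deck i pj ≠ some "0" then ((some 0 : Option Int), pvMsgBlock) else s) s1
        if s.1 ≠ some 0 then ((some 1 : Option Int), s.2) else s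
      else s1
    s2
  else if pi = fi ∧ pj ≠ fj then
    let s0 : Option Int × String := (none, "")
    let s1 :=
      if pj > fj then
        let s := (PySem.List.pyRange (fj + 1) pj 1).foldl
          (fun s j => if pvSq deck pi j ≠ some "0" then ((some 0 : Option Int), pvMsgBlock) else s) s0
        if s.1 ≠ some 0 then ((some 1 : Option Int), s.2) else s
      else s0
    let s2 :=
      if pj < fj then
        let s := (PySem.List.pyRange (fj - 1) pj (-1)).foldl
          (fun s j => if pvSq deck pi j ≠ some "0" then ((some 0 : Option Int), pvMsgBlock) else s) s1
        if s.1 ≠ some 0 then ((some 1 : Option Int), s.2) else s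
      else s1
    s2
  else
    ((some 0 : Option Int), pvMsgBad)

-- ===== PORT B =====
-- geometric predicate: square (i,j) lies strictly between the move's endpoints on the shared file/rank
def pvOnPath (pi pj fi fj i j : Int) : Bool :=
  if pj = fj then decide (j = pj ∧ min pi fi < i ∧ i < max pi fi)
  else decide (i = pi ∧ min pj fj < j ∧ j < max pj fj)

def checklad_alt (deck : List (List String)) (pi : Int) (pj : Int) (fi : Int) (fj : Int) : Option Int × String :=
  if decide (pi = fi) = decide (pj = fj) then ((some 0 : Option Int), pvMsgBad)
  else
    let blocked := (PySem.List.enumerate deck 0).foldl (fun b p =>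
      (PySem.List.enumerate p.2 0).foldl (fun b q =>
        if pvOnPath pi pj fi fj p.1 q.1 && decide (q.2 ≠ "0") then true else b) b) false
    if blocked then ((some 0 : Option Int), pvMsgBlock) else ((some 1 : Option Int), "")

-- ===== PRECONDITION & SPEC =====
-- column scan admissible: no strictly-between square, or all of them on the 0-based board
def pvColOk (deck : List (List String)) (j lo hi : Int) : Bool :=
  decide (hi ≤ lo + 1) ||
  (decide (0 ≤ lo + 1 ∧ hi ≤ (deck.length : Int) ∧ 0 ≤ j) &&
   (PySem.List.pyRange (lo + 1) hi 1).all (fun i => decide (j < ((deck.getD i.toNat []).length : Int))))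

-- row scan admissible
def pvRowOk (deck : List (List String)) (i lo hi : Int) : Bool :=
  decide (hi ≤ lo + 1) ||
  decide (0 ≤ i ∧ i < (deck.length : Int) ∧ 0 ≤ lo + 1 ∧ hi ≤ ((deck.getD i.toNat []).length : Int))

-- Pre_ restricts straight moves with a nonempty strictly-between path to the natural 0-based board
-- domain of a move validator: outside it Python A either raises IndexError or reads squares through
-- negative-index wraparound, coordinates a chessboard move never has.
def Pre_checklad (deck : List (List String)) (pi : Int) (pj : Int) (fi : Int) (fj : Int) : Prop :=
  (pi ≠ fi ∧ pj = fj → pvColOk deck pj (min pi fi) (max pi fi) = true) ∧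
  (pi = fi ∧ pj ≠ fj → pvRowOk deck pi (min pj fj) (max pj fj) = true)
instance (deck : List (List String)) (pi : Int) (pj : Int) (fi : Int) (fj : Int) : Decidable (Pre_checklad deck pi pj fi fj) := by unfold Pre_checklad; infer_instance

def pvWitness_checklad : List (List String) × Int × Int × Int × Int :=
  ([["0", "p"], ["0", "0"], ["0", "K"]], 0, 0, 2, 0)

def Spec_checklad (deck : List (List String)) (pi : Int) (pj : Int) (fi : Int) (fj : Int) (out : Option Int × String) : Prop := out = checklad_alt deck pi pj fi fj
instance (deck : List (List String)) (pi : Int) (pj : Int) (fi : Int) (fj : Int) (out : Option Int × String) : Decidable (Spec_checklad deck pi pj fi fj out) := by unfold Spec_checklad; infer_instance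

-- ===== CLAIM (what is proved, stated in full; the proofs are below) =====
def Claim_equal_checklad : Prop := ∀ (deck : List (List String)) (pi : Int) (pj : Int) (fi : Int) (fj : Int), Dom_checklad deck pi pj fi fj → Pre_checklad deck pi pj fi fj → Spec_checklad deck pi pj fi fj (checklad deck pi pj fi fj)

-- ===== LEMMAS AND PROOFS =====
lemma pv_foldl_block (P : Int → Prop) [DecidablePred P] (l : List Int) (s : Option Int × String) :
    l.foldl (fun s i => if P i then ((some 0 : Option Int), pvMsgBlock) else s) s
      = if l.any (fun i => decide (P i)) then ((some 0 : Option Int), pvMsgBlock) else s := by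
  induction l generalizing s with
  | nil => simp
  | cons a t ih =>
      by_cases h : P a
      · simp only [List.foldl_cons, List.any_cons, h, if_pos, decide_true, Bool.true_or]
        rw [ih]; split <;> rfl
      · simp only [List.foldl_cons, List.any_cons, h, if_neg, decide_false, Bool.false_or,
          not_false_iff]
        exact ih s

lemma pv_any_congr {α β : Type} {l : List α} {l' : List β} {P : α → Bool} {Q : β → Bool}
    (h : (∃ x ∈ l, P x = true) ↔ (∃ y ∈ l', Q y = true)) : l.any P = l'.any Q := by
  by_cases hb : l'.any Q = true
  · rw [hb, List.any_eq_true.mpr (by simpa using h.mpr (by simpa using List.any_eq_true.mp hb))]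
  · rcases hp : l.any P
    · simp only [Bool.not_eq_true] at hb; rw [hb]
    · exact absurd (List.any_eq_true.mpr (by simpa using h.mp (by simpa using List.any_eq_true.mp hp))) hb

-- the descending scan visits the same set of squares as the ascending one
lemma pv_any_rev (g : Int → Bool) (lo hi : Int) :
    (PySem.List.pyRange (hi - 1) lo (-1)).any g = (PySem.List.pyRange (lo + 1) hi 1).any g := by
  apply pv_any_congr
  simp only [PySem.List.mem_pyRange_neg_one, PySem.List.mem_pyRange_one]
  constructor
  · rintro ⟨x, ⟨h1, h2⟩, hx⟩; exact ⟨x, ⟨by omega, by omega⟩, hx⟩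
  · rintro ⟨x, ⟨h1, h2⟩, hx⟩; exact ⟨x, ⟨by omega, by omega⟩, hx⟩

lemma pv_foldl_ite {α : Type} (g : α → Bool) (l : List α) (b : Bool) :
    l.foldl (fun b x => if g x then true else b) b = (b || l.any g) := by
  induction l generalizing b with
  | nil => simp
  | cons a t ih =>
      rw [List.foldl_cons, ih, List.any_cons]
      rcases h : g a <;> simp

lemma pv_foldl_or {α : Type} (g : α → Bool) (l : List α) (b : Bool) :
    l.foldl (fun b x => b || g x) b = (b || l.any g) := by
  induction l generalizing b with
  | nil => simp
  | cons a t ih => simp [List.foldl_cons, ih, Bool.or_assoc]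

lemma pv_bridge_col (deck : List (List String)) (pi pj fi fj : Int) (hpj : pj = fj)
    (hok : pvColOk deck pj (min pi fi) (max pi fi) = true) :
    ((PySem.List.enumerate deck 0).any (fun p => (PySem.List.enumerate p.2 0).any (fun q =>
       pvOnPath pi pj fi fj p.1 q.1 && decide (q.2 ≠ "0"))))
    = (PySem.List.pyRange (min pi fi + 1) (max pi fi) 1).any
        (fun i => decide (pvSq deck i pj ≠ some "0")) := by
  have hOP : ∀ i j : Int, pvOnPath pi pj fi fj i j
      = decide (j = pj ∧ min pi fi < i ∧ i < max pi fi) := by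
    intro i j; rw [pvOnPath, if_pos hpj]
  simp only [hOP]
  apply pv_any_congr
  constructor
  · rintro ⟨p, hp, hq⟩
    rw [List.any_eq_true] at hq
    obtain ⟨q, hqmem, hcond⟩ := hq
    rw [PySem.List.mem_enumerate_iff] at hp
    obtain ⟨k, hk, rfl⟩ := hp
    rw [PySem.List.mem_enumerate_iff] at hqmem
    obtain ⟨m, hm, rfl⟩ := hqmem
    simp only [Bool.and_eq_true, decide_eq_true_iff] at hcond
    obtain ⟨⟨hjm, hlo, hhi⟩, hne⟩ := hcond
    simp only [zero_add] at hjm hlo hhi hne ⊢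
    refine ⟨(k : Int), by rw [PySem.List.mem_pyRange_one]; omega, ?_⟩
    rw [decide_eq_true_iff]
    unfold pvSq
    rw [PySem.List.pyGet?_natCast, List.getElem?_eq_getElem hk, Option.bind_some,
      ← hjm, PySem.List.pyGet?_natCast, List.getElem?_eq_getElem hm]
    simpa using hne
  · rintro ⟨i, hmem, hval⟩
    rw [PySem.List.mem_pyRange_one] at hmem
    rw [decide_eq_true_iff] at hval
    rw [pvColOk, Bool.or_eq_true, Bool.and_eq_true, decide_eq_true_iff, decide_eq_true_iff,
      List.all_eq_true] at hok
    rcases hok with hok | ⟨⟨h0, hlen, hj0⟩, hall⟩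
    · omega
    · have hi0 : 0 ≤ i := by omega
      have hiv : (i.toNat : Int) = i := Int.toNat_of_nonneg hi0
      have hklt : i.toNat < deck.length := by omega
      have hrl := hall i (by rw [PySem.List.mem_pyRange_one]; omega)
      rw [decide_eq_true_iff, List.getD_eq_getElem deck [] hklt] at hrl
      have hjv : (pj.toNat : Int) = pj := Int.toNat_of_nonneg hj0
      have hmlt : pj.toNat < deck[i.toNat].length := by omega
      have hsq : pvSq deck i pj = some deck[i.toNat][pj.toNat] := by
        unfold pvSq
        rw [PySem.List.pyGet?_of_nonneg deck hi0, List.getElem?_eq_getElem hklt,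
          Option.bind_some, PySem.List.pyGet?_of_nonneg _ hj0, List.getElem?_eq_getElem hmlt]
      rw [hsq] at hval
      refine ⟨((0 : Int) + (i.toNat : Int), deck[i.toNat]),
        (PySem.List.mem_enumerate_iff _ _ _).mpr ⟨i.toNat, hklt, rfl⟩, ?_⟩
      rw [List.any_eq_true]
      refine ⟨((0 : Int) + (pj.toNat : Int), deck[i.toNat][pj.toNat]),
        (PySem.List.mem_enumerate_iff _ _ _).mpr ⟨pj.toNat, hmlt, rfl⟩, ?_⟩
      simp only [Bool.and_eq_true, decide_eq_true_iff, zero_add]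
      exact ⟨⟨hjv, by omega, by omega⟩, by simpa using hval⟩

lemma pv_bridge_row (deck : List (List String)) (pi pj fi fj : Int) (hpi : pi = fi) (hpj : pj ≠ fj)
    (hok : pvRowOk deck pi (min pj fj) (max pj fj) = true) :
    ((PySem.List.enumerate deck 0).any (fun p => (PySem.List.enumerate p.2 0).any (fun q =>
       pvOnPath pi pj fi fj p.1 q.1 && decide (q.2 ≠ "0"))))
    = (PySem.List.pyRange (min pj fj + 1) (max pj fj) 1).any
        (fun j => decide (pvSq deck pi j ≠ some "0")) := by
  have hOP : ∀ i j : Int, pvOnPath pi pj fi fj i j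
      = decide (i = pi ∧ min pj fj < j ∧ j < max pj fj) := by
    intro i j; rw [pvOnPath, if_neg hpj]
  simp only [hOP]
  apply pv_any_congr
  constructor
  · rintro ⟨p, hp, hq⟩
    rw [List.any_eq_true] at hq
    obtain ⟨q, hqmem, hcond⟩ := hq
    rw [PySem.List.mem_enumerate_iff] at hp
    obtain ⟨k, hk, rfl⟩ := hp
    rw [PySem.List.mem_enumerate_iff] at hqmem
    obtain ⟨m, hm, rfl⟩ := hqmem
    simp only [Bool.and_eq_true, decide_eq_true_iff] at hcond
    obtain ⟨⟨hik, hlo, hhi⟩, hne⟩ := hcond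
    simp only [zero_add] at hik hlo hhi hne ⊢
    refine ⟨(m : Int), by rw [PySem.List.mem_pyRange_one]; omega, ?_⟩
    rw [decide_eq_true_iff]
    unfold pvSq
    rw [← hik, PySem.List.pyGet?_natCast, List.getElem?_eq_getElem hk, Option.bind_some,
      PySem.List.pyGet?_natCast, List.getElem?_eq_getElem hm]
    simpa using hne
  · rintro ⟨j, hmem, hval⟩
    rw [PySem.List.mem_pyRange_one] at hmem
    rw [decide_eq_true_iff] at hval
    rw [pvRowOk, Bool.or_eq_true, decide_eq_true_iff, decide_eq_true_iff] at hok
    rcases hok with hok | ⟨hi0, hilen, h0, hrl⟩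
    · omega
    · have hiv : (pi.toNat : Int) = pi := Int.toNat_of_nonneg hi0
      have hklt : pi.toNat < deck.length := by omega
      rw [List.getD_eq_getElem deck [] hklt] at hrl
      have hj0 : 0 ≤ j := by omega
      have hjv : (j.toNat : Int) = j := Int.toNat_of_nonneg hj0
      have hmlt : j.toNat < deck[pi.toNat].length := by omega
      have hsq : pvSq deck pi j = some deck[pi.toNat][j.toNat] := by
        unfold pvSq
        rw [PySem.List.pyGet?_of_nonneg deck hi0, List.getElem?_eq_getElem hklt,
          Option.bind_some, PySem.List.pyGet?_of_nonneg _ hj0, List.getElem?_eq_getElem hmlt]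
      rw [hsq] at hval
      refine ⟨((0 : Int) + (pi.toNat : Int), deck[pi.toNat]),
        (PySem.List.mem_enumerate_iff _ _ _).mpr ⟨pi.toNat, hklt, rfl⟩, ?_⟩
      rw [List.any_eq_true]
      refine ⟨((0 : Int) + (j.toNat : Int), deck[pi.toNat][j.toNat]),
        (PySem.List.mem_enumerate_iff _ _ _).mpr ⟨j.toNat, hmlt, rfl⟩, ?_⟩
      simp only [Bool.and_eq_true, decide_eq_true_iff, zero_add]
      exact ⟨⟨hiv, by omega, by omega⟩, by simpa using hval⟩

-- A on a straight column move reduces to the ascending any over the strictly-between rows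
lemma pv_A_col (deck : List (List String)) (pi pj fi fj : Int) (hpi : pi ≠ fi) (hpj : pj = fj) :
    checklad deck pi pj fi fj =
      if (PySem.List.pyRange (min pi fi + 1) (max pi fi) 1).any
          (fun i => decide (pvSq deck i pj ≠ some "0")) then
        ((some 0 : Option Int), pvMsgBlock) else ((some 1 : Option Int), "") := by
  rcases lt_or_gt_of_ne hpi with hlt | hgt
  · have hmin : min pi fi = pi := by omega
    have hmax : max pi fi = fi := by omega
    rw [hmin, hmax, ← pv_any_rev]
    unfold checklad
    rw [if_pos ⟨hpi, hpj⟩]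
    simp only [pv_foldl_block]
    rw [if_neg (show ¬ pi > fi by omega), if_pos hlt]
    by_cases h : ((PySem.List.pyRange (fi - 1) pi (-1)).any
        (fun i => decide (pvSq deck i pj ≠ some "0"))) = true
    · simp_all
    · rw [Bool.not_eq_true] at h; rw [h]; simp
  · have hmin : min pi fi = fi := by omega
    have hmax : max pi fi = pi := by omega
    rw [hmin, hmax]
    unfold checklad
    rw [if_pos ⟨hpi, hpj⟩]
    simp only [pv_foldl_block]
    rw [if_pos hgt, if_neg (show ¬ pi < fi by omega)]
    by_cases h : ((PySem.List.pyRange (fi + 1) pi 1).any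
        (fun i => decide (pvSq deck i pj ≠ some "0"))) = true
    · simp_all
    · rw [Bool.not_eq_true] at h; rw [h]; simp

lemma pv_A_row (deck : List (List String)) (pi pj fi fj : Int) (hpi : pi = fi) (hpj : pj ≠ fj) :
    checklad deck pi pj fi fj =
      if (PySem.List.pyRange (min pj fj + 1) (max pj fj) 1).any
          (fun j => decide (pvSq deck pi j ≠ some "0")) then
        ((some 0 : Option Int), pvMsgBlock) else ((some 1 : Option Int), "") := by
  rcases lt_or_gt_of_ne hpj with hlt | hgt
  · have hmin : min pj fj = pj := by omega
    have hmax : max pj fj = fj := by omega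
    rw [hmin, hmax, ← pv_any_rev]
    unfold checklad
    rw [if_neg (by simp [hpi]), if_pos ⟨hpi, hpj⟩]
    simp only [pv_foldl_block]
    rw [if_neg (show ¬ pj > fj by omega), if_pos hlt]
    by_cases h : ((PySem.List.pyRange (fj - 1) pj (-1)).any
        (fun j => decide (pvSq deck pi j ≠ some "0"))) = true
    · simp_all
    · rw [Bool.not_eq_true] at h; rw [h]; simp
  · have hmin : min pj fj = fj := by omega
    have hmax : max pj fj = pj := by omega
    rw [hmin, hmax]
    unfold checklad
    rw [if_neg (by simp [hpi]), if_pos ⟨hpi, hpj⟩]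
    simp only [pv_foldl_block]
    rw [if_neg (show ¬ pj < fj by omega), if_pos hgt]
    by_cases h : ((PySem.List.pyRange (fj + 1) pj 1).any
        (fun j => decide (pvSq deck pi j ≠ some "0"))) = true
    · simp_all
    · rw [Bool.not_eq_true] at h; rw [h]; simp

-- B on a straight move reduces to the nested any over the enumerated board
lemma pv_B_straight (deck : List (List String)) (pi pj fi fj : Int)
    (h : decide (pi = fi) ≠ decide (pj = fj)) :
    checklad_alt deck pi pj fi fj =
      if ((PySem.List.enumerate deck 0).any (fun p => (PySem.List.enumerate p.2 0).any (fun q =>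
           pvOnPath pi pj fi fj p.1 q.1 && decide (q.2 ≠ "0")))) then
        ((some 0 : Option Int), pvMsgBlock) else ((some 1 : Option Int), "") := by
  unfold checklad_alt
  rw [if_neg h]
  simp only [pv_foldl_ite, pv_foldl_or, Bool.false_or]

-- ===== VERDICT (by name: the statement is the Claim_ definition above) =====
theorem checklad_spec : Claim_equal_checklad := by
  intro deck pi pj fi fj _ hpre
  show checklad deck pi pj fi fj = checklad_alt deck pi pj fi fj
  by_cases hpi : pi = fi <;> by_cases hpj : pj = fj
  · simp [checklad, checklad_alt, hpi, hpj]
  · rw [pv_A_row deck pi pj fi fj hpi hpj,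
        pv_B_straight deck pi pj fi fj (by simp [hpi, hpj]),
        pv_bridge_row deck pi pj fi fj hpi hpj (hpre.2 ⟨hpi, hpj⟩)]
  · rw [pv_A_col deck pi pj fi fj hpi hpj,
        pv_B_straight deck pi pj fi fj (by simp [hpi, hpj]),
        pv_bridge_col deck pi pj fi fj hpj (hpre.1 ⟨hpi, hpj⟩)]
  · simp [checklad, checklad_alt, hpi, hpj]
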